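-- pv_equiv track=rewrite | github.com/achille-bsc/NSI | Projet Naissance.py | count_dates_per_day_of_week
-- ===== SOURCE A (Python) =====
-- def count_dates_per_day_of_week(dates):
--     """
--     Cette fonction prend une liste de dates et retourne une liste contenant le nombre d'occurrences de chaque jour de la semaine.
--
--     Args:
--         dates (list): Une liste de dates.
--
--     Returns:
--         list: Une liste contenant le nombre d'occurrences de chaque jour de la semaine. Les éléments sont dans l'ordre suivant : Lundi, Mardi, Mercredi, Jeudi, Vendredi, Samedi, Dimanche.
--     """
--     # Initialisation des compteurs pour chaque jour de la semaine.
--     monday_count = 0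
--     tuesday_count = 0
--     wednesday_count = 0
--     thursday_count = 0
--     friday_count = 0
--     saturday_count = 0
--     sunday_count = 0
--
--     # On itère sur chaque date pour compter le nombre de dates pour chaque jour de la semaine.
--     for date in dates:
--         # On utilise une structure conditionnelle pour identifier le jour de la semaine et incrémenter le compteur correspondant.
--         if date == "Lundi":
--             monday_count += 1
--         elif date == "Mardi":
--             tuesday_count += 1
--         elif date == "Mercredi":
--             wednesday_count += 1
--         elif date == "Jeudi":
--             thursday_count += 1
--         elif date == "Vendredi":
--             friday_count += 1
--         elif date == "Samedi":
--             saturday_count += 1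
--         elif date == "Dimanche":
--             sunday_count += 1
--
--     # On retourne une liste contenant le nombre de dates pour chaque jour de la semaine, dans l'ordre suivant : Lundi, Mardi, Mercredi, Jeudi, Vendredi, Samedi, Dimanche.
--     return [monday_count, tuesday_count, wednesday_count, thursday_count, friday_count, saturday_count, sunday_count]
-- ===== SOURCE B (Python) =====
-- DAYS = ["Lundi", "Mardi", "Mercredi", "Jeudi", "Vendredi", "Samedi", "Dimanche"]
--
-- def count_dates_per_day_of_week(dates):
--     return [dates.count(day) for day in DAYS]
-- ===== Notes on version B (the rewrite author's own statement) =====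
-- stated objective: simpler
-- what changed: Replaces the single pass maintaining seven named counters through a 7-way if/elif chain by a list comprehension doing one dates.count(day) scan per weekday of a fixed ordered day list.
import Mathlib
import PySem

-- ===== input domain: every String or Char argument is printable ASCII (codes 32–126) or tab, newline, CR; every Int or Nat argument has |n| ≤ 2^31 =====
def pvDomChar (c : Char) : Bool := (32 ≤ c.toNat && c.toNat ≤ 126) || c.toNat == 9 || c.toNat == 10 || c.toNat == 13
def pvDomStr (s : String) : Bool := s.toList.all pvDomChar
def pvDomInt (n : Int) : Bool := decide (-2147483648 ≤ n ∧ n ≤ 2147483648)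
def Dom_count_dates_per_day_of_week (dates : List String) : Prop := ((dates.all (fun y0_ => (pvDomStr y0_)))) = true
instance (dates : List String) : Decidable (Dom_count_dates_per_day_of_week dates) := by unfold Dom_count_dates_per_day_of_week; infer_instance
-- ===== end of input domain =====

-- Header: B replaces A's single-pass seven-counter if/elif chain by one List.count scan per
-- weekday over a fixed ordered day list (objective: simpler).

-- ===== PORT A =====
def pvStep (c : Int × Int × Int × Int × Int × Int × Int) (date : String) :
    Int × Int × Int × Int × Int × Int × Int :=
  let (m, tu, w, th, f, sa, su) := c
  if date = "Lundi" then (m+1, tu, w, th, f, sa, su)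
  else if date = "Mardi" then (m, tu+1, w, th, f, sa, su)
  else if date = "Mercredi" then (m, tu, w+1, th, f, sa, su)
  else if date = "Jeudi" then (m, tu, w, th+1, f, sa, su)
  else if date = "Vendredi" then (m, tu, w, th, f+1, sa, su)
  else if date = "Samedi" then (m, tu, w, th, f, sa+1, su)
  else if date = "Dimanche" then (m, tu, w, th, f, sa, su+1)
  else (m, tu, w, th, f, sa, su)

def count_dates_per_day_of_week (dates : List String) : List Int :=
  let s := dates.foldl pvStep (0, 0, 0, 0, 0, 0, 0)
  [s.1, s.2.1, s.2.2.1, s.2.2.2.1, s.2.2.2.2.1, s.2.2.2.2.2.1, s.2.2.2.2.2.2]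

-- ===== PORT B =====
def pvDays : List String := ["Lundi", "Mardi", "Mercredi", "Jeudi", "Vendredi", "Samedi", "Dimanche"]

def count_dates_per_day_of_week_alt (dates : List String) : List Int :=
  pvDays.map (fun day => (PySem.List.count dates day : Int))

-- ===== PRECONDITION & SPEC =====
def Spec_count_dates_per_day_of_week (dates : List String) (out : List Int) : Prop := out = count_dates_per_day_of_week_alt dates
instance (dates : List String) (out : List Int) : Decidable (Spec_count_dates_per_day_of_week dates out) := by unfold Spec_count_dates_per_day_of_week; infer_instance

-- ===== CLAIM (what is proved, stated in full; the proofs are below) =====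
def Claim_equal_count_dates_per_day_of_week : Prop := ∀ (dates : List String), Dom_count_dates_per_day_of_week dates → Spec_count_dates_per_day_of_week dates (count_dates_per_day_of_week dates)

-- ===== LEMMAS AND PROOFS =====
theorem pvLoop_eq (l : List String) (m tu w th f sa su : Int) :
    l.foldl pvStep (m, tu, w, th, f, sa, su) =
      (m + l.count "Lundi", tu + l.count "Mardi", w + l.count "Mercredi",
       th + l.count "Jeudi", f + l.count "Vendredi", sa + l.count "Samedi",
       su + l.count "Dimanche") := by
  induction l generalizing m tu w th f sa su with
  | nil => simp
  | cons d l ih =>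
    simp only [List.foldl_cons, pvStep]
    split_ifs with h1 h2 h3 h4 h5 h6 h7 <;>
      rw [ih] <;> simp_all <;> ring

-- ===== VERDICT (by name: the statement is the Claim_ definition above) =====
theorem count_dates_per_day_of_week_spec : Claim_equal_count_dates_per_day_of_week := by
  intro dates _
  unfold Spec_count_dates_per_day_of_week count_dates_per_day_of_week count_dates_per_day_of_week_alt pvDays
  simp [pvLoop_eq, PySem.List.count]
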